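-- pv_equiv track=rewrite | github.com/ikerrrrrrrrrrr/Cyrene | src/cyrene/soul.py | _insert_point
-- ===== SOURCE A (Python) =====
-- from typing import List, Optional, Tuple
--
-- def _insert_point(lines: List[str], section_start: int, section_end: int) -> int:
--     """Return the index at which to insert new content inside a section.
--
--     The insert point is placed after the last content line (or the heading
--     line if the section is empty), before any trailing blank lines or the
--     next section.
--     """
--     # Walk backwards from the section end to find the trailing blank gutter.
--     # The first non-blank, non-"---" line is the last real content line.
--     insert_at = section_end
--     for i in range(section_end - 1, section_start - 1, -1):
--         if i >= len(lines):
--             continue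
--         stripped = lines[i].strip()
--         if stripped and stripped != "---":
--             insert_at = i + 1
--             break
--     if insert_at <= section_start:
--         insert_at = section_start + 1  # heading + newline
--     return insert_at
-- ===== SOURCE B (Python) =====
-- from typing import List
--
--
-- def _insert_point(lines: List[str], section_start: int, section_end: int) -> int:
--     """Forward single pass: track the last content line seen in the section."""
--     last = None
--     for i in range(section_start, section_end):
--         if i >= len(lines):
--             continue
--         stripped = lines[i].strip()
--         if stripped and stripped != "---":
--             last = i
--     insert_at = section_end if last is None else last + 1
--     if insert_at <= section_start:
--         insert_at = section_start + 1
--     return insert_at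
-- ===== Notes on version B (the rewrite author's own statement) =====
-- stated objective: alternative
-- what changed: Replaced the backward early-exit scan with a forward single pass that keeps the last-seen content index in an accumulator and derives the insertion point after the loop.
-- outside the precondition, e.g. on _insert_point(['x'], -2, 1): A returns 1, B raises IndexError
import Mathlib
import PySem

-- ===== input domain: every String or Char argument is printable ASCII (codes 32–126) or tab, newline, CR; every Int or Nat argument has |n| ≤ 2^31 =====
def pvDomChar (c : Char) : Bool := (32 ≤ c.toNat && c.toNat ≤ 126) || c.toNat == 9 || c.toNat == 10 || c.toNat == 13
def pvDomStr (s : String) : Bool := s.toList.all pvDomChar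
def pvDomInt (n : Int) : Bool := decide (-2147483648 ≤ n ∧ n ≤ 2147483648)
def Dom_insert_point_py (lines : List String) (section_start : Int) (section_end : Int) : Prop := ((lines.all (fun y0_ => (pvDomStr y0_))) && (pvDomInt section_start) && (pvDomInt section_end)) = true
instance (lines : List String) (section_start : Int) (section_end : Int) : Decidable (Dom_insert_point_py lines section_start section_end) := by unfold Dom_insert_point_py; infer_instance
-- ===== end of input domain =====

-- B rewrites the backward early-exit scan as a forward single pass that tracks the
-- last-seen content index (objective: alternative decomposition; return value only).

-- ===== PORT A =====
-- A's backward loop over range(section_end-1, section_start-1, -1): first content hit breaks.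
def ipLoopA (lines : List String) (section_end : Int) : List Int → Int
  | [] => section_end
  | i :: rest =>
    if i ≥ (lines.length : Int) then ipLoopA lines section_end rest
    else
      match PySem.List.pyGet? lines i with
      | none => section_end  -- IndexError in Python; excluded by Pre_
      | some s =>
        let stripped := PySem.Str.strip s
        if stripped ≠ "" ∧ stripped ≠ "---" then i + 1
        else ipLoopA lines section_end rest

def insert_point_py (lines : List String) (section_start : Int) (section_end : Int) : Int :=
  let insert_at := ipLoopA lines section_end
    (PySem.List.pyRange (section_end - 1) (section_start - 1) (-1))
  if insert_at ≤ section_start then section_start + 1 else insert_at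

-- ===== PORT B =====
-- B's loop body: update the last-seen content index.
def ipStepB (lines : List String) (last : Option Int) (i : Int) : Option Int :=
  if i ≥ (lines.length : Int) then last
  else
    match PySem.List.pyGet? lines i with
    | none => last  -- IndexError in Python; excluded by Pre_
    | some s =>
      let stripped := PySem.Str.strip s
      if stripped ≠ "" ∧ stripped ≠ "---" then some i else last

def insert_point_py_alt (lines : List String) (section_start : Int) (section_end : Int) : Int :=
  let last := (PySem.List.pyRange section_start section_end 1).foldl (ipStepB lines) none
  let insert_at := match last with | none => section_end | some i => i + 1
  if insert_at ≤ section_start then section_start + 1 else insert_at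

-- ===== PRECONDITION & SPEC =====
-- Pre_ excludes section ranges reaching indices below -len(lines), where Python's negative
-- indexing runs off the list: there A raises IndexError unless a content line breaks the
-- backward scan first (an accident of scan direction), and B raises IndexError.
def Pre_insert_point_py (lines : List String) (section_start : Int) (section_end : Int) : Prop :=
  section_end ≤ section_start ∨ -(lines.length : Int) ≤ section_start
instance (lines : List String) (section_start : Int) (section_end : Int) : Decidable (Pre_insert_point_py lines section_start section_end) := by unfold Pre_insert_point_py; infer_instance

def pvWitness_insert_point_py : List String × Int × Int := (["hdr", "a", ""], 0, 3)

def Spec_insert_point_py (lines : List String) (section_start : Int) (section_end : Int) (out : Int) : Prop := out = insert_point_py_alt lines section_start section_end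
instance (lines : List String) (section_start : Int) (section_end : Int) (out : Int) : Decidable (Spec_insert_point_py lines section_start section_end out) := by unfold Spec_insert_point_py; infer_instance

-- ===== CLAIM (what is proved, stated in full; the proofs are below) =====
def Claim_equal_insert_point_py : Prop := ∀ (lines : List String) (section_start : Int) (section_end : Int), Dom_insert_point_py lines section_start section_end → Pre_insert_point_py lines section_start section_end → Spec_insert_point_py lines section_start section_end (insert_point_py lines section_start section_end)

-- ===== LEMMAS AND PROOFS =====

-- the common per-index content test
def ipHit (lines : List String) (i : Int) : Bool :=
  if i ≥ (lines.length : Int) then false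
  else
    match PySem.List.pyGet? lines i with
    | none => false
    | some s =>
      let stripped := PySem.Str.strip s
      decide (stripped ≠ "" ∧ stripped ≠ "---")

theorem ipStepB_eq (lines : List String) (last : Option Int) (i : Int) :
    ipStepB lines last i = if ipHit lines i then some i else last := by
  unfold ipStepB ipHit
  by_cases h : i ≥ (lines.length : Int)
  · simp [h]
  · cases hg : PySem.List.pyGet? lines i with
    | none => simp [h]
    | some s =>
      by_cases hc : (PySem.Str.strip s) ≠ "" ∧ (PySem.Str.strip s) ≠ "---" <;>
        simp [h, hc]

theorem ipLoopA_eq (lines : List String) (section_end : Int) (L : List Int)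
    (H : ∀ i ∈ L, i < (lines.length : Int) → (PySem.List.pyGet? lines i).isSome) :
    ipLoopA lines section_end L =
      match L.find? (ipHit lines) with
      | some i => i + 1
      | none => section_end := by
  induction L with
  | nil => simp [ipLoopA]
  | cons i rest ih =>
    have Hrest : ∀ j ∈ rest, j < (lines.length : Int) → (PySem.List.pyGet? lines j).isSome :=
      fun j hj => H j (List.mem_cons_of_mem _ hj)
    by_cases h : i ≥ (lines.length : Int)
    · have hhit : ipHit lines i = false := by simp [ipHit, h]
      simp [ipLoopA, h, hhit, ih Hrest]
    · have hi : i < (lines.length : Int) := lt_of_not_ge h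
      have hsome := H i (List.mem_cons_self) hi
      cases hg : PySem.List.pyGet? lines i with
      | none => rw [hg] at hsome; simp at hsome
      | some s =>
        have hhit : ipHit lines i = decide ((PySem.Str.strip s) ≠ "" ∧ (PySem.Str.strip s) ≠ "---") := by
          simp [ipHit, h, hg]
        by_cases hc : (PySem.Str.strip s) ≠ "" ∧ (PySem.Str.strip s) ≠ "---"
        · simp [ipLoopA, h, hg, hc, hhit]
        · simp [ipLoopA, h, hg, hc, hhit, ih Hrest]

theorem foldl_stepB_eq (lines : List String) (L : List Int) (acc : Option Int) :
    L.foldl (ipStepB lines) acc =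
      match L.reverse.find? (ipHit lines) with
      | some i => some i
      | none => acc := by
  induction L generalizing acc with
  | nil => simp
  | cons j rest ih =>
    simp only [List.foldl_cons, ih, List.reverse_cons, List.find?_append, ipStepB_eq]
    cases hr : rest.reverse.find? (ipHit lines) with
    | some i => simp
    | none =>
      by_cases hj : ipHit lines j = true <;> simp [List.find?, hj]

theorem insert_point_py_spec : Claim_equal_insert_point_py := by
  intro lines s e _ hpre
  unfold Spec_insert_point_py insert_point_py insert_point_py_alt
  have hrev : PySem.List.pyRange (e - 1) (s - 1) (-1) =
      (PySem.List.pyRange s e 1).reverse := by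
    have := PySem.List.pyRange_neg_one_eq_reverse (e - 1) (s - 1)
    simpa using this
  have H : ∀ i ∈ PySem.List.pyRange (e - 1) (s - 1) (-1),
      i < (lines.length : Int) → (PySem.List.pyGet? lines i).isSome := by
    intro i hi hlt
    rw [hrev, List.mem_reverse, PySem.List.mem_pyRange_one] at hi
    rcases hpre with hpre | hpre
    · omega
    · have : PySem.Raise.InRange lines.length i := ⟨by omega, hlt⟩
      rw [Option.isSome_iff_ne_none]
      intro hnone
      rw [PySem.List.pyGet?_eq_none_iff] at hnone
      exact hnone this
  rw [ipLoopA_eq lines e _ H, foldl_stepB_eq, hrev]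
  cases (PySem.List.pyRange s e 1).reverse.find? (ipHit lines) <;> rfl
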